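-- pv_equiv track=rewrite | github.com/TheClitCommander/Minerva | processor/response_blender.py | _build_comparison_response
-- ===== SOURCE A (Python) =====
-- from typing import Dict, List, Any, Optional
--
-- def _build_comparison_response(sections: List[Dict[str, Any]]) -> str:
--     """Build a comparison response from sections"""
--     # Arrange sections in a logical order
--     arranged_sections = sorted(
--         sections,
--         key=lambda s: 0 if s['title'].lower() in ('introduction', 'overview') else 1
--     )
--
--     # Join the sections
--     blended_text = ""
--     for section in arranged_sections:
--         blended_text += section['content'] + '\n\n'
--
--     return blended_text.strip()
-- ===== SOURCE B (Python) =====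
-- def _build_comparison_response(sections):
--     """Build a comparison response from sections"""
--     # Single stable-partition pass instead of a sort: intro/overview sections first.
--     firsts = []
--     rest = []
--     for s in sections:
--         if s['title'].lower() in ('introduction', 'overview'):
--             firsts.append(s)
--         else:
--             rest.append(s)
--     return '\n\n'.join(sec['content'] for sec in firsts + rest).strip()
-- ===== Notes on version B (the rewrite author's own statement) =====
-- stated objective: simpler
-- what changed: Replaces the stable sort by a binary key plus string accumulation with a single two-bucket partition pass and a '\n\n'.join of the bucket contents.
import Mathlib
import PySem

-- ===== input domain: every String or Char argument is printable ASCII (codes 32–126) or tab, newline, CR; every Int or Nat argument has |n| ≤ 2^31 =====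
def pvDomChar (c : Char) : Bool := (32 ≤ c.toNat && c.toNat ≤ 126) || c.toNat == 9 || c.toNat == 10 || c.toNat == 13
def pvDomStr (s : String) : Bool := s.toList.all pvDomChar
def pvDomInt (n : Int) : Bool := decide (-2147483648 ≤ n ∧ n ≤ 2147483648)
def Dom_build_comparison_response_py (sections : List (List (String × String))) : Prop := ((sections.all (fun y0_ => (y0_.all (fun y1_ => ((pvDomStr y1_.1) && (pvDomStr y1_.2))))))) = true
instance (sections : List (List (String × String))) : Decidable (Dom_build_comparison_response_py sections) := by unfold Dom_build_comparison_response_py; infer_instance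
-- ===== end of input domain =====

-- B replaces A's stable sort (binary key) + string accumulation with one partition pass and a join; same return value.

-- ===== PORT A =====
-- key=lambda s: 0 if s['title'].lower() in ('introduction', 'overview') else 1
def pvTitleKey (s : List (String × String)) : Int :=
  if PySem.Str.lower ((PySem.Dict.get? ⟨s⟩ "title").getD "") = "introduction" ∨
     PySem.Str.lower ((PySem.Dict.get? ⟨s⟩ "title").getD "") = "overview" then 0 else 1

def build_comparison_response_py (sections : List (List (String × String))) : String :=
  let arranged := PySem.List.sorted sections pvTitleKey
  let blended := arranged.foldl (fun t sec => t ++ (PySem.Dict.get? ⟨sec⟩ "content").getD "" ++ "\n\n") ""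
  PySem.Str.strip blended

-- ===== PORT B =====
-- s['title'].lower() in ('introduction', 'overview')
def pvIsFirst (s : List (String × String)) : Bool :=
  decide (PySem.Str.lower ((PySem.Dict.get? ⟨s⟩ "title").getD "") = "introduction" ∨
          PySem.Str.lower ((PySem.Dict.get? ⟨s⟩ "title").getD "") = "overview")

def build_comparison_response_py_alt (sections : List (List (String × String))) : String :=
  let buckets := sections.foldl
    (fun (p : List (List (String × String)) × List (List (String × String))) s =>
      if pvIsFirst s then (p.1 ++ [s], p.2) else (p.1, p.2 ++ [s])) ([], [])
  PySem.Str.strip (PySem.Str.join "\n\n"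
    ((buckets.1 ++ buckets.2).map (fun sec => (PySem.Dict.get? ⟨sec⟩ "content").getD "")))

-- ===== PRECONDITION & SPEC =====
-- Pre_ excludes exactly the inputs where Python A raises KeyError: a section missing 'title' or 'content'.
def Pre_build_comparison_response_py (sections : List (List (String × String))) : Prop :=
  (sections.all (fun s => ((PySem.Dict.get? ⟨s⟩ "title").isSome && (PySem.Dict.get? ⟨s⟩ "content").isSome))) = true
instance (sections : List (List (String × String))) : Decidable (Pre_build_comparison_response_py sections) := by unfold Pre_build_comparison_response_py; infer_instance

def pvWitness_build_comparison_response_py : (List (List (String × String))) :=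
  [[("title", "Body"), ("content", "b")], [("title", "Overview"), ("content", "a")]]

def Spec_build_comparison_response_py (sections : List (List (String × String))) (out : String) : Prop := out = build_comparison_response_py_alt sections
instance (sections : List (List (String × String))) (out : String) : Decidable (Spec_build_comparison_response_py sections out) := by unfold Spec_build_comparison_response_py; infer_instance

-- ===== CLAIM (what is proved, stated in full; the proofs are below) =====
def Claim_equal_build_comparison_response_py : Prop := ∀ (sections : List (List (String × String))), Dom_build_comparison_response_py sections → Pre_build_comparison_response_py sections → Spec_build_comparison_response_py sections (build_comparison_response_py sections)

-- ===== LEMMAS AND PROOFS =====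

-- key relation between the two ports' helpers
theorem pvTitleKey_eq (s : List (String × String)) :
    pvTitleKey s = if pvIsFirst s then 0 else 1 := by
  simp [pvTitleKey, pvIsFirst]

-- insertBy appends when x goes before nothing
theorem insertBy_all_false {α : Type} (before : α → α → Bool) (x : α) :
    ∀ l : List α, (∀ y ∈ l, before x y = false) → PySem.List.insertBy before x l = l ++ [x] := by
  intro l
  induction l with
  | nil => intro _; rfl
  | cons y ys ih =>
    intro h
    simp [PySem.List.insertBy, h y (by simp)]
    exact ih (fun z hz => h z (by simp [hz]))

-- insertBy skips a prefix it does not go before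
theorem insertBy_skip {α : Type} (before : α → α → Bool) (x : α) :
    ∀ l0 l1 : List α, (∀ y ∈ l0, before x y = false) →
      PySem.List.insertBy before x (l0 ++ l1) = l0 ++ PySem.List.insertBy before x l1 := by
  intro l0
  induction l0 with
  | nil => intro l1 _; rfl
  | cons y ys ih =>
    intro l1 h
    have hy : before x y = false := h y (by simp)
    cases l1 with
    | nil =>
      simp only [List.cons_append]
      simp [PySem.List.insertBy, hy]
      have := ih [] (fun z hz => h z (by simp [hz]))
      simpa using this
    | cons z zs =>
      simp only [List.cons_append]
      simp [PySem.List.insertBy, hy]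
      have := ih (z :: zs) (fun w hw => h w (by simp [hw]))
      simpa using this

-- insertBy puts x at the head when it goes before the head (or list empty)
theorem insertBy_cons_true {α : Type} (before : α → α → Bool) (x y : α) (ys : List α)
    (h : before x y = true) : PySem.List.insertBy before x (y :: ys) = x :: y :: ys := by
  simp [PySem.List.insertBy, h]

-- the sort of A with the binary key is the stable partition
theorem sorted_eq_partition (l : List (List (String × String))) :
    PySem.List.sorted l pvTitleKey =
      l.filter pvIsFirst ++ l.filter (fun s => !pvIsFirst s) := by
  have main : ∀ (l : List (List (String × String)))
      (F0 F1 : List (List (String × String))),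
      (∀ y ∈ F0, pvIsFirst y = true) → (∀ y ∈ F1, pvIsFirst y = false) →
      l.foldl (fun acc x => PySem.List.insertBy
          (fun a b => decide (pvTitleKey a < pvTitleKey b)) x acc) (F0 ++ F1) =
        (F0 ++ l.filter pvIsFirst) ++ (F1 ++ l.filter (fun s => !pvIsFirst s)) := by
    intro l
    induction l with
    | nil => intro F0 F1 _ _; simp
    | cons x xs ih =>
      intro F0 F1 h0 h1
      by_cases hx : pvIsFirst x = true
      · have hstep : PySem.List.insertBy
            (fun a b => decide (pvTitleKey a < pvTitleKey b)) x (F0 ++ F1)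
            = (F0 ++ [x]) ++ F1 := by
          rw [insertBy_skip]
          · cases F1 with
            | nil => simp [PySem.List.insertBy]
            | cons z zs =>
              rw [insertBy_cons_true]
              · simp
              · have hz : pvIsFirst z = false := h1 z (by simp)
                simp [pvTitleKey_eq, hx, hz]
          · intro y hy
            have hy' : pvIsFirst y = true := h0 y hy
            simp [pvTitleKey_eq, hx, hy']
        simp only [List.foldl_cons, hstep]
        have := ih (F0 ++ [x]) F1
          (by intro y hy; rcases List.mem_append.mp hy with h | h
              · exact h0 y h
              · simp at h; subst h; exact hx) h1
        rw [this]
        simp [hx]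
      · have hx' : pvIsFirst x = false := by simpa using hx
        have hstep : PySem.List.insertBy
            (fun a b => decide (pvTitleKey a < pvTitleKey b)) x (F0 ++ F1)
            = F0 ++ (F1 ++ [x]) := by
          rw [← List.append_assoc]
          apply insertBy_all_false
          intro y hy
          rcases List.mem_append.mp hy with h | h
          · have : pvIsFirst y = true := h0 y h
            simp [pvTitleKey_eq, hx', this]
          · have : pvIsFirst y = false := h1 y h
            simp [pvTitleKey_eq, hx', this]
        simp only [List.foldl_cons, hstep]
        have := ih F0 (F1 ++ [x]) h0
          (by intro y hy; rcases List.mem_append.mp hy with h | h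
              · exact h1 y h
              · simp at h; subst h; exact hx')
        rw [this]
        simp [hx']
  have := main l [] [] (by simp) (by simp)
  simpa [PySem.List.sorted] using this

-- B's partition loop computes the two filters
theorem partition_foldl (l : List (List (String × String))) :
    ∀ (a b : List (List (String × String))),
      l.foldl (fun (p : List (List (String × String)) × List (List (String × String))) s =>
        if pvIsFirst s then (p.1 ++ [s], p.2) else (p.1, p.2 ++ [s])) (a, b)
      = (a ++ l.filter pvIsFirst, b ++ l.filter (fun s => !pvIsFirst s)) := by
  induction l with
  | nil => intro a b; simp
  | cons x xs ih =>
    intro a b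
    by_cases hx : pvIsFirst x = true
    · simp [hx, ih, List.append_assoc]
    · have hx' : pvIsFirst x = false := by simpa using hx
      simp [hx', ih, List.append_assoc]

-- A's accumulation loop, on the character level, is intercalate plus a trailing separator
theorem foldl_sep (sep : List Char) :
    ∀ (cs : List (List Char)) (a : List Char),
      cs.foldl (fun t c => t ++ c ++ sep) a
      = a ++ sep.intercalate cs ++ (if cs.isEmpty then [] else sep) := by
  intro cs
  induction cs with
  | nil => intro a; simp [List.intercalate]
  | cons c cs' ih =>
    intro a
    simp only [List.foldl_cons, ih]
    cases cs' with
    | nil => simp [List.intercalate]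
    | cons d ds =>
      simp [List.intercalate, List.append_assoc]

-- dropping trailing whitespace: strip (t ++ ws) = strip t for all-whitespace ws
theorem strip_append_ws (t ws : List Char) (hws : ∀ c ∈ ws, PySem.Chars.isspace c = true) :
    PySem.Chars.strip (t ++ ws) = PySem.Chars.strip t := by
  have hdropws : ws.dropWhile PySem.Chars.isspace = [] :=
    List.dropWhile_eq_nil_iff.mpr hws
  have hdropwsr : ws.reverse.dropWhile PySem.Chars.isspace = [] :=
    List.dropWhile_eq_nil_iff.mpr (fun c hc => hws c (List.mem_reverse.mp hc))
  simp only [PySem.Chars.strip, PySem.Chars.lstrip]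
  rw [List.dropWhile_append]
  by_cases h : (t.dropWhile PySem.Chars.isspace).isEmpty = true
  · rw [List.isEmpty_iff] at h
    simp [h, hdropws]
  · rw [if_neg h]
    simp only [PySem.Chars.rstrip, List.reverse_append]
    rw [List.dropWhile_append]
    simp [hdropwsr]

-- A's String-level loop, pushed to lists of characters
theorem foldA_toList (L : List (List (String × String))) :
    ∀ (a : String),
      (L.foldl (fun t sec => t ++ (PySem.Dict.get? ⟨sec⟩ "content").getD "" ++ "\n\n") a).toList
      = (L.map (fun sec => ((PySem.Dict.get? ⟨sec⟩ "content").getD "").toList)).foldl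
          (fun t c => t ++ c ++ ['\n', '\n']) a.toList := by
  induction L with
  | nil => intro a; simp
  | cons x xs ih =>
    intro a
    simp only [List.foldl_cons, List.map_cons, ih]
    congr 1
    simp [String.toList_append]

-- ===== VERDICT (by name: the statement is the Claim_ definition above) =====
theorem build_comparison_response_py_spec : Claim_equal_build_comparison_response_py := by
  intro sections _ _
  unfold Spec_build_comparison_response_py
  unfold build_comparison_response_py build_comparison_response_py_alt
  simp only [sorted_eq_partition, partition_foldl, List.nil_append]
  set F := sections.filter pvIsFirst ++ sections.filter (fun s => !pvIsFirst s) with hF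
  apply String.toList_inj.mp
  simp only [PySem.Str.strip, String.toList_ofList, PySem.Str.join, foldA_toList]
  rw [foldl_sep]
  have hmap : (F.map (fun sec => ((PySem.Dict.get? ⟨sec⟩ "content").getD "").toList))
      = (F.map (fun sec => (PySem.Dict.get? ⟨sec⟩ "content").getD "")).map String.toList := by
    simp
  rw [hmap]
  simp only [PySem.Chars.join]
  have hsep : ("\n\n" : String).toList = ['\n', '\n'] := rfl
  rw [hsep] at *
  by_cases hE : (F.map (fun sec => ((PySem.Dict.get? ⟨sec⟩ "content").getD ""))).map String.toList = []
  · simp [hE]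
  · have hne : ((F.map (fun sec => ((PySem.Dict.get? ⟨sec⟩ "content").getD ""))).map String.toList).isEmpty = false := by
      simpa [List.isEmpty_eq_false_iff] using hE
    rw [hne]
    simp only [String.toList_empty, List.nil_append, Bool.false_eq_true, if_false]
    exact strip_append_ws _ ['\n', '\n'] (by intro c hc; simp at hc; subst hc; rfl)
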